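-- pv_equiv track=rewrite | github.com/Tryonme-com/tryonyou-app | api/financial_guard.py | _allowlist_path
-- ===== SOURCE A (Python) =====
-- def _allowlist_path(path: str) -> bool:
--     """Cobro inaugural, webhooks Stripe y estado soberano (monitor Jules); el resto → 402 si impago."""
--     p = path or ""
--     prefixes = (
--         "/api/stripe_webhook_fr",
--         "/stripe_webhook_fr",
--         "/api/stripe_inauguration_checkout",
--         "/stripe_inauguration_checkout",
--         "/api/v1/falla/cobros",
--         "/api/v1/falla/memories",
--         "/api/sovereignty_guard_status",
--         "/sovereignty_guard_status",
--     )
--     return any(p == pref or p.startswith(pref + "/") for pref in prefixes)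
-- ===== SOURCE B (Python) =====
-- def _allowlist_path(path: str) -> bool:
--     """Single pass over the path: probe each slash-boundary prefix against a set."""
--     p = path or ""
--     allowed = {
--         "/api/stripe_webhook_fr",
--         "/stripe_webhook_fr",
--         "/api/stripe_inauguration_checkout",
--         "/stripe_inauguration_checkout",
--         "/api/v1/falla/cobros",
--         "/api/v1/falla/memories",
--         "/api/sovereignty_guard_status",
--         "/sovereignty_guard_status",
--     }
--     candidate = ""
--     for ch in p:
--         if ch == "/" and candidate in allowed:
--             return True
--         candidate += ch
--     return candidate in allowed
-- ===== Notes on version B (the rewrite author's own statement) =====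
-- stated objective: alternative
-- what changed: Instead of testing the path against each of the 8 allowlisted prefixes with equality / startswith, B makes a single pass over the path itself, probing each slash-boundary prefix (and finally the whole path) against a set of allowed prefixes.
import Mathlib
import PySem

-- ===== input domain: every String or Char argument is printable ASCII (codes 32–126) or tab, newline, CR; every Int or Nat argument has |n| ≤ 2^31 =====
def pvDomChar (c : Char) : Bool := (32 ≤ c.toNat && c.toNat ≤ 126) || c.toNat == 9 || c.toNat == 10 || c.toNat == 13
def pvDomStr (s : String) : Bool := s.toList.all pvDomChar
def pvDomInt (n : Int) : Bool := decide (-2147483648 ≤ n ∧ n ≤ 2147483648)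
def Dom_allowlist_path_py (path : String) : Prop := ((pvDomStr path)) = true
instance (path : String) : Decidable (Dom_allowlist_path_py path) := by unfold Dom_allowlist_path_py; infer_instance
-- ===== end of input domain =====

-- B replaces A's scan over all 8 prefixes by a single pass over the path that probes
-- each '/'-boundary prefix against a set (objective: alternative/idiomatic, not faster).

-- ===== PORT A =====
-- A's tuple of prefixes
def pvPrefixes : List String :=
  [ "/api/stripe_webhook_fr",
    "/stripe_webhook_fr",
    "/api/stripe_inauguration_checkout",
    "/stripe_inauguration_checkout",
    "/api/v1/falla/cobros",
    "/api/v1/falla/memories",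
    "/api/sovereignty_guard_status",
    "/sovereignty_guard_status" ]

def allowlist_path_py (path : String) : Bool :=
  -- p = path or ""  ('or ""' is the identity on strings: "" or "" == "")
  let p := path
  pvPrefixes.any (fun pref =>
    p.toList == pref.toList || PySem.Chars.startswith p.toList (pref.toList ++ ['/']))

-- ===== PORT B =====
-- B's set of allowed prefixes (Python set literal; elements as char lists)
def pvAllowed : PySem.Set (List Char) :=
  PySem.Set.ofList
    [ "/api/stripe_webhook_fr".toList,
      "/stripe_webhook_fr".toList,
      "/api/stripe_inauguration_checkout".toList,
      "/stripe_inauguration_checkout".toList,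
      "/api/v1/falla/cobros".toList,
      "/api/v1/falla/memories".toList,
      "/api/sovereignty_guard_status".toList,
      "/sovereignty_guard_status".toList ]

-- the for-loop of B: candidate accumulates the chars seen so far; early return on a hit
def pvAltLoop (candidate : List Char) : List Char → Bool
  | [] => PySem.Set.contains pvAllowed candidate
  | c :: cs =>
      if c == '/' && PySem.Set.contains pvAllowed candidate then true
      else pvAltLoop (candidate ++ [c]) cs

def allowlist_path_py_alt (path : String) : Bool :=
  -- p = path or ""  (identity on strings)
  let p := path
  pvAltLoop [] p.toList

-- ===== PRECONDITION & SPEC =====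
def Spec_allowlist_path_py (path : String) (out : Bool) : Prop := out = allowlist_path_py_alt path
instance (path : String) (out : Bool) : Decidable (Spec_allowlist_path_py path out) := by unfold Spec_allowlist_path_py; infer_instance

-- ===== CLAIM (what is proved, stated in full; the proofs are below) =====
def Claim_equal_allowlist_path_py : Prop := ∀ (path : String), Dom_allowlist_path_py path → Spec_allowlist_path_py path (allowlist_path_py path)

-- ===== LEMMAS AND PROOFS =====

-- B's loop hits exactly when some slash-boundary prefix (or the whole string) is allowed
lemma pvAltLoop_iff (cs : List Char) : ∀ (acc : List Char),
    pvAltLoop acc cs = true ↔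
      ∃ i, i ≤ cs.length ∧ (i = cs.length ∨ cs[i]? = some '/') ∧
        (acc ++ cs.take i) ∈ pvAllowed := by
  induction cs with
  | nil =>
      intro acc
      simp [pvAltLoop, PySem.Set.contains]
  | cons c cs ih =>
      intro acc
      simp only [pvAltLoop]
      by_cases h : (c == '/' && PySem.Set.contains pvAllowed acc) = true
      · rw [if_pos h]
        obtain ⟨h1, h2⟩ : c = '/' ∧ PySem.Set.contains pvAllowed acc = true := by
          simpa using h
        simp only [true_iff]
        refine ⟨0, by omega, Or.inr (by simp [h1]), ?_⟩
        simpa [PySem.Set.contains] using h2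
      · rw [if_neg h, ih (acc ++ [c])]
        constructor
        · rintro ⟨j, hj, hb, hm⟩
          refine ⟨j + 1, by simp; omega, ?_, by simpa [List.append_assoc] using hm⟩
          rcases hb with hb | hb
          · left; simp [hb]
          · right; simpa using hb
        · rintro ⟨i, hi, hb, hm⟩
          rcases i with _ | j
          · exfalso
            rcases hb with hb | hb
            · simp at hb
            · simp at hb
              apply h
              simp only [Bool.and_eq_true, beq_iff_eq]
              exact ⟨hb, by simpa [PySem.Set.contains] using hm⟩
          · refine ⟨j, by simp at hi; omega, ?_, by simpa [List.append_assoc] using hm⟩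
            rcases hb with hb | hb
            · left; simp at hb; omega
            · right; simpa using hb

-- A's per-prefix test is exactly "w is a slash-boundary prefix (or all) of p"
lemma pvPrefixTest_iff (p w : List Char) :
    (p == w || PySem.Chars.startswith p (w ++ ['/'])) = true ↔
      ∃ i, i ≤ p.length ∧ (i = p.length ∨ p[i]? = some '/') ∧ p.take i = w := by
  rw [Bool.or_eq_true, beq_iff_eq, PySem.Chars.startswith_iff]
  constructor
  · rintro (rfl | ⟨t, ht⟩)
    · exact ⟨p.length, le_rfl, Or.inl rfl, by simp⟩
    · refine ⟨w.length, ?_, ?_, ?_⟩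
      · rw [← ht]; simp
      · right
        rw [← ht, List.append_assoc, List.getElem?_append_right le_rfl]
        simp
      · rw [← ht, List.append_assoc, List.take_left]
  · rintro ⟨i, hi, hb, rfl⟩
    rcases hb with hb | hb
    · left; simp [hb]
    · right
      refine ⟨(p.drop i).tail, ?_⟩
      have hd : p.drop i = '/' :: (p.drop i).tail := by
        have h0 : (p.drop i)[0]? = some '/' := by
          rw [List.getElem?_drop]; simpa using hb
        cases hdrop : p.drop i with
        | nil => rw [hdrop] at h0; simp at h0
        | cons a t => rw [hdrop] at h0; simp at h0; simp [h0]
      calc p.take i ++ ['/'] ++ (p.drop i).tail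
          = p.take i ++ ('/' :: (p.drop i).tail) := by simp
        _ = p.take i ++ p.drop i := by rw [← hd]
        _ = p := List.take_append_drop i p

-- B's set is A's prefix tuple, element-wise as char lists (the 8 literals are distinct)
lemma pvAllowed_eq : pvAllowed = pvPrefixes.map (fun s => s.toList) := by decide

-- membership in A's prefix list (as char lists) = membership in B's set
lemma pvMem_iff (w : List Char) :
    (∃ pref ∈ pvPrefixes, pref.toList = w) ↔ w ∈ pvAllowed := by
  rw [pvAllowed_eq, List.mem_map]

-- ===== VERDICT (by name: the statement is the Claim_ definition above) =====
theorem allowlist_path_py_spec : Claim_equal_allowlist_path_py := by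
  intro path _
  unfold Spec_allowlist_path_py allowlist_path_py allowlist_path_py_alt
  simp only []
  rw [Bool.eq_iff_iff, List.any_eq_true, pvAltLoop_iff]
  constructor
  · rintro ⟨pref, hp, ht⟩
    rcases (pvPrefixTest_iff path.toList pref.toList).mp ht with ⟨i, hi, hb, heq⟩
    exact ⟨i, hi, hb, by rw [heq]; exact (pvMem_iff _).mp ⟨pref, hp, rfl⟩⟩
  · rintro ⟨i, hi, hb, hm⟩
    rcases (pvMem_iff _).mpr (by simpa using hm) with ⟨pref, hp, heq⟩
    exact ⟨pref, hp, (pvPrefixTest_iff path.toList pref.toList).mpr ⟨i, hi, hb, by simpa using heq.symm⟩⟩
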